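-- pv_equiv track=rewrite | github.com/vunguyen1408/no-more-weekend | label_visualize/label_image/compare_data_and_data_crawler/compare_label.py | check
-- ===== SOURCE A (Python) =====
-- def check(list_label, list_bigger, label_relationship):
--     if list_label == []:
--         return False
--
--     flag = True
--     for label in list_label:
--         if label not in list_bigger:
--             if label not in label_relationship:
--                 flag = False
--                 break
--     return flag
-- ===== SOURCE B (Python) =====
-- def check(list_label, list_bigger, label_relationship):
--     if list_label == []:
--         return False
--     need = sorted(list_label)
--     have = sorted(list_bigger + label_relationship)
--     j = 0
--     for x in need:
--         while j < len(have) and have[j] < x: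
--             j += 1
--         if j >= len(have) or have[j] != x:
--             return False
--     return True
-- ===== Notes on version B (the rewrite author's own statement) =====
-- stated objective: alternative
-- what changed: Replaces the per-label membership loop over the raw lists with a sort-then-merge algorithm: sort the labels and the concatenated allowed lists, then a single two-pointer merge scan decides containment.
import Mathlib
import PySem

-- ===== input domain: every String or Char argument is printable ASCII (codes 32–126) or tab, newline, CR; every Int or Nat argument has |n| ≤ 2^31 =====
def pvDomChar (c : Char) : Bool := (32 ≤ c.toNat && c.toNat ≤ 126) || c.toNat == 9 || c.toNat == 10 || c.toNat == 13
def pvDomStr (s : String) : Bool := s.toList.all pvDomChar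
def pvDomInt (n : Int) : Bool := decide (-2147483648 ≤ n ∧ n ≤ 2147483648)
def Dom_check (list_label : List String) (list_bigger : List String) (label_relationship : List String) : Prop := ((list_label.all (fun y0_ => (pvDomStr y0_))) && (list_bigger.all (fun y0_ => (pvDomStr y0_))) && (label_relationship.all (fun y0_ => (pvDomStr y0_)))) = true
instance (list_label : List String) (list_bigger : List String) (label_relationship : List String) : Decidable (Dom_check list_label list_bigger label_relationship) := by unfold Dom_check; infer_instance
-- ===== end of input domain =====

-- B replaces A's per-label membership loop with sort-then-merge: sort labels and the
-- concatenated allowed lists, then one two-pointer merge scan decides containment (alternative).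

-- ===== PORT A =====
-- A's for-loop with flag and break: returns false at the first label in neither collection.
def checkLoop (labels : List String) (list_bigger : List String) (label_relationship : List String) : Bool :=
  match labels with
  | [] => true
  | label :: rest =>
    if ¬ (label ∈ list_bigger) then
      if ¬ (label ∈ label_relationship) then false
      else checkLoop rest list_bigger label_relationship
    else checkLoop rest list_bigger label_relationship

def check (list_label : List String) (list_bigger : List String) (label_relationship : List String) : Bool :=
  if list_label = [] then false
  else checkLoop list_label list_bigger label_relationship

-- ===== PORT B =====
-- Source B's merge loop: the while-advance over `have` becomes dropping the head; the
-- for-loop over `need` becomes the outer recursion; the index j is the consumed prefix.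
def mergeScan (need : List String) (hv : List String) : Bool :=
  match need, hv with
  | [], _ => true
  | _ :: _, [] => false                      -- j >= len(have): return False
  | x :: rest, h :: hs =>
    if h < x then mergeScan (x :: rest) hs   -- while have[j] < x: j += 1
    else if h = x then mergeScan rest (h :: hs)
    else false                               -- have[j] != x: return False
termination_by need.length + hv.length

def check_alt (list_label : List String) (list_bigger : List String) (label_relationship : List String) : Bool :=
  if list_label = [] then false
  else
    let need := PySem.List.sorted list_label (fun x => x) false
    let hv := PySem.List.sorted (list_bigger ++ label_relationship) (fun x => x) false
    mergeScan need hv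

-- ===== PRECONDITION & SPEC =====
def Spec_check (list_label : List String) (list_bigger : List String) (label_relationship : List String) (out : Bool) : Prop := out = check_alt list_label list_bigger label_relationship
instance (list_label : List String) (list_bigger : List String) (label_relationship : List String) (out : Bool) : Decidable (Spec_check list_label list_bigger label_relationship out) := by unfold Spec_check; infer_instance

-- ===== CLAIM (what is proved, stated in full; the proofs are below) =====
def Claim_equal_check : Prop := ∀ (list_label : List String) (list_bigger : List String) (label_relationship : List String), Dom_check list_label list_bigger label_relationship → Spec_check list_label list_bigger label_relationship (check list_label list_bigger label_relationship)

-- ===== LEMMAS AND PROOFS =====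
theorem checkLoop_eq_all (labels list_bigger label_relationship : List String) :
    checkLoop labels list_bigger label_relationship
      = labels.all (fun l => l ∈ list_bigger ∨ l ∈ label_relationship) := by
  induction labels with
  | nil => simp [checkLoop]
  | cons l rest ih =>
    by_cases hb : l ∈ list_bigger <;> by_cases hr : l ∈ label_relationship <;>
      simp [checkLoop, hb, hr, ih]

-- On sorted inputs, the merge scan decides elementwise containment.
theorem mergeScan_eq_all (need hv : List String)
    (hn : need.Pairwise (· ≤ ·)) (hh : hv.Pairwise (· ≤ ·)) :
    mergeScan need hv = need.all (· ∈ hv) := by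
  induction need, hv using mergeScan.induct with
  | case1 hv => simp [mergeScan]
  | case2 x rest =>
    simp [mergeScan]
  | case3 x rest h hs hlt ih =>
    rw [List.pairwise_cons] at hh
    have hrec := ih hn hh.2
    rw [mergeScan, if_pos hlt, hrec, Bool.eq_iff_iff]
    simp only [List.all_eq_true, decide_eq_true_eq]
    constructor
    · intro hall l hl
      exact List.mem_cons_of_mem h (hall l hl)
    · intro hall l hl
      rcases List.mem_cons.mp (hall l hl) with he | hm
      · exfalso
        rcases List.mem_cons.mp hl with rfl | hlr
        · exact absurd he hlt.ne'
        · rw [List.pairwise_cons] at hn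
          exact absurd he (lt_of_lt_of_le hlt (hn.1 l hlr)).ne' 
      · exact hm
  | case4 rest x hs hlt ih =>
    rw [List.pairwise_cons] at hn
    have hrec := ih hn.2 hh
    rw [mergeScan, if_neg hlt, if_pos rfl, hrec, Bool.eq_iff_iff]
    simp [List.all_eq_true]
  | case5 x rest h hs hlt hne =>
    rw [mergeScan, if_neg hlt, if_neg hne]
    rw [List.pairwise_cons] at hh
    have hx : ¬ x ∈ h :: hs := by
      intro hm
      rcases List.mem_cons.mp hm with rfl | hm
      · exact hne rfl
      · have hxh : x < h := lt_of_le_of_ne (le_of_not_gt hlt) (fun e => hne e.symm)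
        exact absurd (hh.1 x hm) (not_le_of_gt hxh)
    simp only [List.all_cons, Bool.false_eq, Bool.and_eq_false_iff]
    exact Or.inl (decide_eq_false hx)

-- ===== VERDICT (by name: the statement is the Claim_ definition above) =====
theorem check_spec : Claim_equal_check := by
  intro list_label list_bigger label_relationship _
  unfold Spec_check check check_alt
  by_cases h : list_label = []
  · simp [h]
  · simp only [h, if_false]
    rw [checkLoop_eq_all,
      mergeScan_eq_all _ _
        (by simpa using PySem.List.sorted_pairwise list_label (fun x => x) )
        (by simpa using PySem.List.sorted_pairwise (list_bigger ++ label_relationship) (fun x => x)),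
      Bool.eq_iff_iff]
    simp [List.all_eq_true, PySem.List.mem_sorted, List.mem_append]
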